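-- pv_equiv track=rewrite | github.com/InertiaUK/UKBinCollectionData | uk_bin_collection/uk_bin_collection/councils/EastDevonDC.py | _match_address
-- ===== SOURCE A (Python) =====
-- def _match_address(addresses, uprn=None, paon=None):
--     """Match an address from addressfinder results by UPRN or house number/name."""
--     if uprn:
--         uprn_str = str(uprn).zfill(12)
--         for addr in addresses:
--             if str(addr.get("UPRN", "")) == uprn_str:
--                 return addr
--
--     if paon:
--         paon_norm = str(paon).strip().upper()
--         for addr in addresses:
--             label = str(addr.get("label", "")).upper()
--             if label.startswith(paon_norm + " ") or label.startswith(paon_norm + ","):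
--                 return addr
--         for addr in addresses:
--             label = str(addr.get("label", "")).upper()
--             if paon_norm in label:
--                 return addr
--
--     return addresses[0]
-- ===== SOURCE B (Python) =====
-- def _match_address(addresses, uprn=None, paon=None):
--     """Match an address from addressfinder results by UPRN or house number/name."""
--     uprn_str = str(uprn).zfill(12) if uprn else None
--     paon_norm = str(paon).strip().upper() if paon else None
--
--     def rank(addr):
--         if uprn_str is not None and str(addr.get("UPRN", "")) == uprn_str:
--             return 0
--         if paon_norm is not None:
--             label = str(addr.get("label", "")).upper()
--             if label.startswith(paon_norm + " ") or label.startswith(paon_norm + ","):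
--                 return 1
--             if paon_norm in label:
--                 return 2
--         return 3
--
--     return min(enumerate(addresses), key=lambda ia: (rank(ia[1]), ia[0]))[1]
-- ===== Notes on version B (the rewrite author's own statement) =====
-- stated objective: alternative
-- what changed: The three staged searches (UPRN loop, prefix loop, substring loop) are replaced by assigning every address a priority rank 0-3 and taking min(enumerate(addresses)) by (rank, index), so one uniform selection replaces A's cascade of early-returning loops.
-- outside the precondition, e.g. on _match_address([], None, None): A raises IndexError, B raises ValueError
import Mathlib
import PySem

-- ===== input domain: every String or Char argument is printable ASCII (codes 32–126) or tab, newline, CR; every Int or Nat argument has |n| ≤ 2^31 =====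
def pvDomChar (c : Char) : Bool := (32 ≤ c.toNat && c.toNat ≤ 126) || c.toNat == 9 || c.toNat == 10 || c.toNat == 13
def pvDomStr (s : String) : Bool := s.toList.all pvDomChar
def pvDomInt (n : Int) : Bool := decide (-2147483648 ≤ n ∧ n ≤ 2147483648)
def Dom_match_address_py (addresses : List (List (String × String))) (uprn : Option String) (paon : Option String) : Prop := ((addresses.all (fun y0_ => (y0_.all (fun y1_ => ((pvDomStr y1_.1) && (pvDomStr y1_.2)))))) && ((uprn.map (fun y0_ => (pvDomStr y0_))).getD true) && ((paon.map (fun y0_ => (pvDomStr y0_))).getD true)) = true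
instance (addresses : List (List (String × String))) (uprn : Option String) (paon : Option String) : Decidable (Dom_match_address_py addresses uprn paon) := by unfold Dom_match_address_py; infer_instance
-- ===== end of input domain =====

-- B replaces A's three staged early-returning loops (UPRN, prefix, substring) by one uniform
-- selection: rank every address 0-3 and take min(enumerate(addresses)) by (rank, index)
-- (objective: alternative; same results, one selection pass instead of a cascade).

-- ===== PORT A =====

-- addr.get(k, "") on a dict literal (assoc list in insertion order)
def pvGetStr (addr : List (String × String)) (k : String) : String :=
  PySem.Dict.getD (PySem.Dict.mk addr) k ""

-- prefix test of A's first paon loop: label.startswith(paon_norm + " ") or label.startswith(paon_norm + ",")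
def pvPrefixHit (pn : String) (addr : List (String × String)) : Bool :=
  PySem.Str.startswith (PySem.Str.upper (pvGetStr addr "label")) (pn ++ " ") ||
  PySem.Str.startswith (PySem.Str.upper (pvGetStr addr "label")) (pn ++ ",")

-- substring test of A's second paon loop: paon_norm in label
def pvSubHit (pn : String) (addr : List (String × String)) : Bool :=
  PySem.Str.isIn pn (PySem.Str.upper (pvGetStr addr "label"))

-- A's paon phase: first loop over prefix matches, then a second full loop over substring matches
def pvPaonPhase (pn : String) (addresses : List (List (String × String))) :
    Option (List (String × String)) :=
  match addresses.find? (pvPrefixHit pn) with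
  | some addr => some addr
  | none => addresses.find? (pvSubHit pn)

-- 'for addr in addresses: if str(addr.get("UPRN","")) == uprn_str: return addr'
def pvUprnLoop (addresses : List (List (String × String))) (us : String) :
    Option (List (String × String)) :=
  addresses.find? (fun addr => pvGetStr addr "UPRN" == us)

def match_address_py (addresses : List (List (String × String))) (uprn : Option String) (paon : Option String) : List (String × String) :=
  let ur : Option (List (String × String)) :=
    match uprn with
    | none => none
    | some u => if u = "" then none else pvUprnLoop addresses (PySem.Str.zfill u 12)
  match ur with
  | some addr => addr
  | none =>
    let pr : Option (List (String × String)) :=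
      match paon with
      | none => none
      | some p =>
        if p = "" then none else
          pvPaonPhase (PySem.Str.upper (PySem.Str.strip p)) addresses
    match pr with
    | some addr => addr
    | none => addresses.headD []   -- addresses[0]; Pre_ guarantees addresses ≠ []

-- ===== PORT B =====

-- Source B's rank(addr): 0 = UPRN match, 1 = prefix match, 2 = substring match, 3 = no match
def pvRank (us pn : Option String) (addr : List (String × String)) : Nat :=
  if (match us with | some u => pvGetStr addr "UPRN" == u | none => false) then 0
  else
    match pn with
    | some p => if pvPrefixHit p addr then 1 else if pvSubHit p addr then 2 else 3
    | none => 3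

-- min(enumerate(addresses), key=lambda ia: (rank(ia[1]), ia[0]))[1]; B raises on [], Pre_ excludes it
def match_address_py_alt (addresses : List (List (String × String))) (uprn : Option String) (paon : Option String) : List (String × String) :=
  let us : Option String :=
    match uprn with
    | some u => if u = "" then none else some (PySem.Str.zfill u 12)
    | none => none
  let pn : Option String :=
    match paon with
    | some p => if p = "" then none else some (PySem.Str.upper (PySem.Str.strip p))
    | none => none
  match PySem.List.min2? (PySem.List.enumerate addresses)
      (fun ia => pvRank us pn ia.2) (fun ia => ia.1) with
  | some ia => ia.2
  | none => []

-- ===== PRECONDITION & SPEC =====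
-- A raises IndexError at addresses[0] exactly when addresses is empty (a match needs a nonempty
-- list), and B's min() raises ValueError there too; Pre_ excludes only that crash.
def Pre_match_address_py (addresses : List (List (String × String))) (uprn : Option String) (paon : Option String) : Prop :=
  addresses ≠ []
instance (addresses : List (List (String × String))) (uprn : Option String) (paon : Option String) : Decidable (Pre_match_address_py addresses uprn paon) := by unfold Pre_match_address_py; infer_instance

def pvWitness_match_address_py : (List (List (String × String))) × Option String × Option String :=
  ([[("UPRN", "7"), ("label", "7 High St")]], some "7", some "7")

def Spec_match_address_py (addresses : List (List (String × String))) (uprn : Option String) (paon : Option String) (out : List (String × String)) : Prop := out = match_address_py_alt addresses uprn paon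
instance (addresses : List (List (String × String))) (uprn : Option String) (paon : Option String) (out : List (String × String)) : Decidable (Spec_match_address_py addresses uprn paon out) := by unfold Spec_match_address_py; infer_instance

-- ===== CLAIM =====
def Claim_equal_match_address_py : Prop := ∀ (addresses : List (List (String × String))) (uprn : Option String) (paon : Option String), Dom_match_address_py addresses uprn paon → Pre_match_address_py addresses uprn paon → Spec_match_address_py addresses uprn paon (match_address_py addresses uprn paon)

-- ===== LEMMAS AND PROOFS =====

-- first-minimum fold: the value min(...) keeps once the index tie-break is shown dead
def pvFM (r : List (String × String) → Nat) :
    List (String × String) → List (List (String × String)) → List (String × String)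
  | b, [] => b
  | b, y :: ys => if r y < r b then pvFM r y ys else pvFM r b ys

theorem pvFM_nil (r b) : pvFM r b [] = b := rfl
theorem pvFM_cons (r b y ys) :
    pvFM r b (y :: ys) = if r y < r b then pvFM r y ys else pvFM r b ys := rfl

-- the index component of min2?'s key never decides: indices in enumerate strictly increase.
-- f is abstract (instantiated with min2?'s step function, hypotheses discharged by rfl).
theorem pvFoldMin_aux (r : List (String × String) → Nat)
    {f : Option (Int × List (String × String)) → Int × List (String × String) →
      Option (Int × List (String × String))}
    (hsome : ∀ m x, f (some m) x =
      if (decide (r x.2 < r m.2) || !decide (r m.2 < r x.2) && decide (x.1 < m.1)) = true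
      then some x else some m) :
    ∀ (ys : List (List (String × String))) (b : List (String × String)) (i s : Int), i < s →
      (((PySem.List.enumerate ys s).foldl f (some (i, b))).map Prod.snd) =
        some (pvFM r b ys) := by
  intro ys
  induction ys with
  | nil => intro b i s h; simp [PySem.List.enumerate, pvFM_nil]
  | cons y ys ih =>
    intro b i s h
    rw [PySem.List.enumerate_cons, List.foldl_cons, hsome]
    by_cases hr : r y < r b
    · have hc : (decide (r y < r b) || !decide (r b < r y) && decide (s < i)) = true := by
        simp [hr]
      rw [if_pos hc, pvFM_cons, if_pos hr]
      exact ih y s (s + 1) (by omega)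
    · have hc : ¬ ((decide (r y < r b) || !decide (r b < r y) && decide (s < i)) = true) := by
        have hsi : ¬ (s < i) := by omega
        by_cases hr2 : r b < r y <;> simp [hr, hr2, hsi]
      rw [if_neg hc, pvFM_cons, if_neg hr]
      exact ih b i (s + 1) (by omega)

theorem pvFoldMin (r : List (String × String) → Nat)
    {f : Option (Int × List (String × String)) → Int × List (String × String) →
      Option (Int × List (String × String))}
    (hnone : ∀ x, f none x = some x)
    (hsome : ∀ m x, f (some m) x =
      if (decide (r x.2 < r m.2) || !decide (r m.2 < r x.2) && decide (x.1 < m.1)) = true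
      then some x else some m)
    (a : List (String × String)) (rest : List (List (String × String))) :
    (((PySem.List.enumerate (a :: rest)).foldl f none).map Prod.snd) =
      some (pvFM r a rest) := by
  rw [PySem.List.enumerate_cons, List.foldl_cons, hnone]
  exact pvFoldMin_aux r hsome rest a 0 (0 + 1) (by omega)

-- B's min2? over enumerate, projected to the value, is the first-minimum fold
theorem pvMin2_snd (r : List (String × String) → Nat) (a : List (String × String))
    (rest : List (List (String × String))) :
    (PySem.List.min2? (PySem.List.enumerate (a :: rest))
        (fun ia => r ia.2) (fun ia => ia.1)).map Prod.snd = some (pvFM r a rest) := by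
  unfold PySem.List.min2?
  exact pvFoldMin r (fun x => rfl) (fun m x => rfl) a rest

-- the first-minimum of the 0/1/2/3 rank equals A's cascade of three find?s with head fallback
theorem pvFM_cascade (p0 p1 p2 : List (String × String) → Bool) :
    ∀ (ys : List (List (String × String))) (b : List (String × String)),
      pvFM (fun x => if p0 x then 0 else if p1 x then 1 else if p2 x then 2 else 3) b ys =
        (((b :: ys).find? p0).getD
          (((b :: ys).find? p1).getD
            (((b :: ys).find? p2).getD b))) := by
  intro ys
  induction ys with
  | nil =>
    intro b
    by_cases h0 : p0 b <;> by_cases h1 : p1 b <;> by_cases h2 : p2 b <;>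
      simp [pvFM_nil, List.find?, *]
  | cons y ys ih =>
    intro b
    rw [pvFM_cons]
    by_cases h0b : p0 b <;> by_cases h1b : p1 b <;> by_cases h2b : p2 b <;>
    by_cases h0y : p0 y <;> by_cases h1y : p1 y <;> by_cases h2y : p2 y <;>
      simp [List.find?, h0b, h1b, h2b, h0y, h1y, h2y, ih]

theorem pvFind_false (xs : List (List (String × String))) :
    xs.find? (fun _ => false) = none := by
  induction xs <;> simp [List.find?, *]

theorem match_address_py_witness_ok :
    Dom_match_address_py pvWitness_match_address_py.1 pvWitness_match_address_py.2.1 pvWitness_match_address_py.2.2 ∧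
    Pre_match_address_py pvWitness_match_address_py.1 pvWitness_match_address_py.2.1 pvWitness_match_address_py.2.2 := by
  constructor <;> decide

-- the three match predicates, named once so every statement shares them
def pvP0 (us : Option String) (x : List (String × String)) : Bool :=
  match us with | some u => pvGetStr x "UPRN" == u | none => false
def pvP1 (pn : Option String) (x : List (String × String)) : Bool :=
  match pn with | some p => pvPrefixHit p x | none => false
def pvP2 (pn : Option String) (x : List (String × String)) : Bool :=
  match pn with | some p => pvSubHit p x | none => false

theorem pvP0_some (u : String) : pvP0 (some u) = fun x => pvGetStr x "UPRN" == u := by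
  funext x; rfl
theorem pvP0_none : pvP0 none = fun _ => false := by funext x; rfl
theorem pvP1_some (p : String) : pvP1 (some p) = pvPrefixHit p := by funext x; rfl
theorem pvP1_none : pvP1 none = fun _ => false := by funext x; rfl
theorem pvP2_some (p : String) : pvP2 (some p) = pvSubHit p := by funext x; rfl
theorem pvP2_none : pvP2 none = fun _ => false := by funext x; rfl

theorem pvAlt_eq (us pn : Option String) (a : List (String × String))
    (rest : List (List (String × String))) :
    (match PySem.List.min2? (PySem.List.enumerate (a :: rest))
        (fun ia => pvRank us pn ia.2) (fun ia => ia.1) with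
     | some ia => ia.2
     | none => ([] : List (String × String))) =
      (((a :: rest).find? (pvP0 us)).getD
        (((a :: rest).find? (pvP1 pn)).getD
          (((a :: rest).find? (pvP2 pn)).getD a))) := by
  have h := pvMin2_snd (pvRank us pn) a rest
  cases hm : PySem.List.min2? (PySem.List.enumerate (a :: rest))
      (fun ia => pvRank us pn ia.2) (fun ia => ia.1) with
  | none => rw [hm] at h; simp at h
  | some x =>
    rw [hm] at h
    simp only [Option.map_some, Option.some.injEq] at h
    have hrank : pvRank us pn = fun x =>
        if pvP0 us x then 0 else if pvP1 pn x then 1 else if pvP2 pn x then 2 else 3 := by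
      funext z
      cases us <;> cases pn <;>
        simp [pvRank, pvP0_some, pvP0_none, pvP1_some, pvP1_none, pvP2_some, pvP2_none]
    show x.2 = _
    rw [h, hrank, pvFM_cascade]

-- B on a nonempty list, with the lets zeta-reduced, is the cascade
theorem pvAlt_closed (a : List (String × String)) (rest : List (List (String × String)))
    (uprn paon : Option String) :
    match_address_py_alt (a :: rest) uprn paon =
      (((a :: rest).find? (pvP0
          (match uprn with
           | some u => if u = "" then none else some (PySem.Str.zfill u 12)
           | none => none))).getD
        (((a :: rest).find? (pvP1
          (match paon with
           | some p => if p = "" then none else some (PySem.Str.upper (PySem.Str.strip p))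
           | none => none))).getD
          (((a :: rest).find? (pvP2
            (match paon with
             | some p => if p = "" then none else some (PySem.Str.upper (PySem.Str.strip p))
             | none => none))).getD a))) := by
  unfold match_address_py_alt
  exact pvAlt_eq _ _ a rest

-- ===== VERDICT =====
theorem match_address_py_spec : Claim_equal_match_address_py := by
  intro addresses uprn paon _ hpre
  unfold Spec_match_address_py
  cases addresses with
  | nil => exact absurd rfl hpre
  | cons a rest =>
    rw [pvAlt_closed]
    unfold match_address_py
    cases uprn with
    | none =>
      simp only [pvP0_none, pvFind_false, Option.getD_none]
      cases paon with
      | none => simp [pvP1_none, pvP2_none, pvFind_false]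
      | some p =>
        by_cases hp : p = ""
        · simp [hp, pvP1_none, pvP2_none, pvFind_false]
        · simp only [hp, if_neg hp, ite_false, pvP1_some, pvP2_some]
          unfold pvPaonPhase
          rcases h1 : (a :: rest).find? (pvPrefixHit (PySem.Str.upper (PySem.Str.strip p))) with ⟨⟩ | x
          · simp only [h1, Option.getD_none]
            rcases h2 : (a :: rest).find? (pvSubHit (PySem.Str.upper (PySem.Str.strip p))) with ⟨⟩ | y <;>
              simp [h1, h2, List.headD]
          · simp [h1]
    | some u =>
      by_cases hu : u = ""
      · simp only [hu, ite_true, if_pos rfl, pvP0_none, pvFind_false, Option.getD_none]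
        cases paon with
        | none => simp [pvP1_none, pvP2_none, pvFind_false]
        | some p =>
          by_cases hp : p = ""
          · simp [hp, pvP1_none, pvP2_none, pvFind_false]
          · simp only [hp, if_neg hp, ite_false, pvP1_some, pvP2_some]
            unfold pvPaonPhase
            rcases h1 : (a :: rest).find? (pvPrefixHit (PySem.Str.upper (PySem.Str.strip p))) with ⟨⟩ | x
            · simp only [h1, Option.getD_none]
              rcases h2 : (a :: rest).find? (pvSubHit (PySem.Str.upper (PySem.Str.strip p))) with ⟨⟩ | y <;>
                simp [h1, h2, List.headD]
            · simp [h1]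
      · simp only [hu, if_neg hu, ite_false, pvP0_some]
        unfold pvUprnLoop
        rcases h0 : (a :: rest).find? (fun addr => pvGetStr addr "UPRN" == PySem.Str.zfill u 12) with ⟨⟩ | x
        · simp only [h0, Option.getD_none]
          cases paon with
          | none => simp [h0, pvP1_none, pvP2_none, pvFind_false]
          | some p =>
            by_cases hp : p = ""
            · simp [hp, h0, pvP1_none, pvP2_none, pvFind_false]
            · simp only [hp, if_neg hp, ite_false, pvP1_some, pvP2_some]
              unfold pvPaonPhase
              rcases h1 : (a :: rest).find? (pvPrefixHit (PySem.Str.upper (PySem.Str.strip p))) with ⟨⟩ | x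
              · simp only [h1, Option.getD_none]
                rcases h2 : (a :: rest).find? (pvSubHit (PySem.Str.upper (PySem.Str.strip p))) with ⟨⟩ | y <;>
                  simp [h0, h1, h2, List.headD]
              · simp [h0, h1]
        · simp [h0]
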